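-- pv_equiv track=rewrite | github.com/epam/cloud-pipeline | storage-lifecycle-service/sls/cloud/s3_cloud.py | get_storage_class_transition_map
-- ===== SOURCE A (Python) =====
-- def get_storage_class_transition_map(transition_storage_classes):
--     possible_storage_classes = ["GLACIER_IR", "GLACIER", "DEEP_ARCHIVE", "DELETION"]
--     storage_class_road_map = {}
--     source_storage_classes = ["STANDARD"]
--     for storage_class in possible_storage_classes:
--         if storage_class not in transition_storage_classes:
--             source_storage_classes.append(storage_class)
--         else:
--             storage_class_road_map[storage_class] = source_storage_classes
--             source_storage_classes = [storage_class]
--     return storage_class_road_map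
-- ===== SOURCE B (Python) =====
-- def get_storage_class_transition_map(transition_storage_classes):
--     possible_storage_classes = ["GLACIER_IR", "GLACIER", "DEEP_ARCHIVE", "DELETION"]
--     storage_class_road_map = {}
--     prev_label = "STANDARD"
--     prev_idx = -1
--     for i, storage_class in enumerate(possible_storage_classes):
--         if storage_class in transition_storage_classes:
--             storage_class_road_map[storage_class] = [prev_label] + possible_storage_classes[prev_idx + 1:i]
--             prev_label = storage_class
--             prev_idx = i
--     return storage_class_road_map
-- ===== Notes on version B (the rewrite author's own statement) =====
-- stated objective: alternative
-- what changed: Instead of growing and resetting an accumulator list of source classes, B keeps only the previous boundary label and index and slices the intervening non-transition classes out of the fixed class list at each transition class.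
import Mathlib
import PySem

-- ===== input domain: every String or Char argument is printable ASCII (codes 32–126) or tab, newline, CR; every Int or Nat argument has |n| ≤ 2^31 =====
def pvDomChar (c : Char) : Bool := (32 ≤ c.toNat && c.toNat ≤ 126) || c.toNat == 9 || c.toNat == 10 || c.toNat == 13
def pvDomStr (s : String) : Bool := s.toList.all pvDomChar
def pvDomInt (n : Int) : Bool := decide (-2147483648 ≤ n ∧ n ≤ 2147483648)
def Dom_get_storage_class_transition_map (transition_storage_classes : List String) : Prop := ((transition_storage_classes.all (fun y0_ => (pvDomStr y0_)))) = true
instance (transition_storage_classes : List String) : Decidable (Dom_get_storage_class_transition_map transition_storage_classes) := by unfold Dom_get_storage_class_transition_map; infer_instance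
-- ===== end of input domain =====

-- B replaces A's grown-and-reset accumulator of source classes by a running boundary
-- label/index and a slice of the fixed class list (objective: alternative decomposition).

-- ===== PORT A =====
def get_storage_class_transition_map (transition_storage_classes : List String) : List (String × List String) :=
  let possible_storage_classes : List String := ["GLACIER_IR", "GLACIER", "DEEP_ARCHIVE", "DELETION"]
  let st := possible_storage_classes.foldl
    (fun (st : PySem.Dict String (List String) × List String) storage_class =>
      if ¬ (transition_storage_classes.contains storage_class) then
        (st.1, st.2 ++ [storage_class])
      else
        (st.1.insert storage_class st.2, [storage_class]))
    (PySem.Dict.empty, ["STANDARD"])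
  st.1.items

-- ===== PORT B =====
def get_storage_class_transition_map_alt (transition_storage_classes : List String) : List (String × List String) :=
  let possible_storage_classes : List String := ["GLACIER_IR", "GLACIER", "DEEP_ARCHIVE", "DELETION"]
  let st := (PySem.List.enumerate possible_storage_classes).foldl
    (fun (st : PySem.Dict String (List String) × String × Int) (p : Int × String) =>
      if transition_storage_classes.contains p.2 then
        (st.1.insert p.2 ([st.2.1] ++ PySem.List.slice possible_storage_classes (some (st.2.2 + 1)) (some p.1)),
         p.2, p.1)
      else st)
    (PySem.Dict.empty, "STANDARD", -1)
  st.1.items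

-- ===== PRECONDITION & SPEC =====
def Spec_get_storage_class_transition_map (transition_storage_classes : List String) (out : List (String × List String)) : Prop := out = get_storage_class_transition_map_alt transition_storage_classes
instance (transition_storage_classes : List String) (out : List (String × List String)) : Decidable (Spec_get_storage_class_transition_map transition_storage_classes out) := by unfold Spec_get_storage_class_transition_map; infer_instance

-- ===== CLAIM (what is proved, stated in full; the proofs are below) =====
def Claim_equal_get_storage_class_transition_map : Prop := ∀ (transition_storage_classes : List String), Dom_get_storage_class_transition_map transition_storage_classes → Spec_get_storage_class_transition_map transition_storage_classes (get_storage_class_transition_map transition_storage_classes)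

-- ===== LEMMAS AND PROOFS =====

-- ===== VERDICT (by name: the statement is the Claim_ definition above) =====
theorem get_storage_class_transition_map_spec : Claim_equal_get_storage_class_transition_map := by
  intro tcs _
  unfold Spec_get_storage_class_transition_map
  by_cases h1 : "GLACIER_IR" ∈ tcs <;>
  by_cases h2 : "GLACIER" ∈ tcs <;>
  by_cases h3 : "DEEP_ARCHIVE" ∈ tcs <;>
  by_cases h4 : "DELETION" ∈ tcs <;>
  simp [get_storage_class_transition_map, get_storage_class_transition_map_alt,
    PySem.List.enumerate, PySem.List.slice, PySem.List.clampIdx, List.foldl, h1, h2, h3, h4]
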